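-- pv_equiv track=rewrite | github.com/neonotfrommatrix/LexicalAnalysis | Lexer.py | identifier_fsm
-- ===== SOURCE A (Python) =====
-- def identifier_fsm(token):
--     """
--     state machine
--     state/input     alpha   num     $      other
--         0           1       2       2       2
--         (1)         1       1       1       2
--         2           2       2       2       2
--
--     """
--     transition_function = [
--         [1, 2, 2, 2],
--         [1, 1, 1, 2],
--         [2, 2, 2, 2]
--     ]
--
--     current_state = 0
--     for character in token:
--         if character.isalpha():
--             column = 0
--
--         elif character.isdigit():
--             column = 1
--         elif character == '$':
--             column = 2
--         else:
--             column = 3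
--
--         current_state = transition_function[current_state][column]
--
--     return current_state == 1
-- ===== SOURCE B (Python) =====
-- def identifier_fsm(token):
--     if not token or not token[0].isalpha():
--         return False
--     return all(c.isalpha() or c.isdigit() or c == '$' for c in token[1:])
-- ===== Notes on version B (the rewrite author's own statement) =====
-- stated objective: simpler
-- what changed: Replaces the transition table and explicit current_state loop with a first-character guard plus all() over the tail, using the absorbing-dead-state property of the FSM.
import Mathlib
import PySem

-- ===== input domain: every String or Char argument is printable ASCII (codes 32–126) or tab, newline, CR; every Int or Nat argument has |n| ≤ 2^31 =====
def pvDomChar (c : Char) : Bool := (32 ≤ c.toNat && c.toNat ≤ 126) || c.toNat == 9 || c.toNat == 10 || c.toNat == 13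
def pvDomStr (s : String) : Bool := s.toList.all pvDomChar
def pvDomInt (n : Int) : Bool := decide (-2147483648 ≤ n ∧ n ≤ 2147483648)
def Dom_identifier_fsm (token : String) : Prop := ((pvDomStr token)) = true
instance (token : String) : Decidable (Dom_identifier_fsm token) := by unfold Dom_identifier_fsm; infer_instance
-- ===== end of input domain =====

-- B replaces A's transition table and state loop by a first-character guard plus a
-- universal predicate over the tail (objective: simpler).

-- ===== PORT A =====
-- the transition table of A, verbatim
def pvTable : List (List Nat) := [[1, 2, 2, 2], [1, 1, 1, 2], [2, 2, 2, 2]]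

-- one iteration of A's loop body: pick the column, index the table
-- (states stay in 0..2 and columns in 0..3, so list indexing never leaves range;
--  List.getD is exact here)
def pvStep (s : Nat) (c : Char) : Nat :=
  let col : Nat :=
    if PySem.Chars.isalpha c then 0
    else if PySem.Chars.isdigit c then 1
    else if c = '$' then 2
    else 3
  (pvTable.getD s []).getD col 0

def identifier_fsm (token : String) : Bool :=
  (token.toList.foldl pvStep 0) == 1

-- ===== PORT B =====
def identifier_fsm_alt (token : String) : Bool :=
  match token.toList with
  | [] => false
  | c :: rest =>
      PySem.Chars.isalpha c &&
        rest.all (fun ch => PySem.Chars.isalpha ch || PySem.Chars.isdigit ch || ch == '$')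

-- ===== PRECONDITION & SPEC =====
def Spec_identifier_fsm (token : String) (out : Bool) : Prop := out = identifier_fsm_alt token
instance (token : String) (out : Bool) : Decidable (Spec_identifier_fsm token out) := by unfold Spec_identifier_fsm; infer_instance

-- ===== CLAIM (what is proved, stated in full; the proofs are below) =====
def Claim_equal_identifier_fsm : Prop := ∀ (token : String), Dom_identifier_fsm token → Spec_identifier_fsm token (identifier_fsm token)

-- ===== LEMMAS AND PROOFS =====

-- state 2 is absorbing for a single step
theorem pvStep_two (c : Char) : pvStep 2 c = 2 := by
  simp only [pvStep, pvTable]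
  split_ifs <;> rfl

-- hence the whole fold from state 2 stays at 2
theorem pvFold_two (cs : List Char) : cs.foldl pvStep 2 = 2 := by
  induction cs with
  | nil => rfl
  | cons c cs ih => simpa [pvStep_two] using ih

-- from the accepting state 1, the fold ends at 1 iff every character is alpha/digit/'$'
theorem pvFold_one (cs : List Char) :
    (cs.foldl pvStep 1 == 1) =
      cs.all (fun ch => PySem.Chars.isalpha ch || PySem.Chars.isdigit ch || ch == '$') := by
  induction cs with
  | nil => rfl
  | cons c cs ih =>
    by_cases ha : PySem.Chars.isalpha c = true
    · simpa [List.foldl_cons, pvStep, pvTable, ha] using ih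
    · by_cases hd : PySem.Chars.isdigit c = true
      · simpa [List.foldl_cons, pvStep, pvTable, ha, hd] using ih
      · by_cases hs : c = '$'
        · simpa [List.foldl_cons, pvStep, pvTable, ha, hd, hs] using ih
        · simp [List.foldl_cons, pvStep, pvTable, ha, hd, hs, pvFold_two,
                beq_iff_eq]

-- ===== VERDICT (by name: the statement is the Claim_ definition above) =====
theorem identifier_fsm_spec : Claim_equal_identifier_fsm := by
  intro token _
  unfold Spec_identifier_fsm identifier_fsm identifier_fsm_alt
  cases h : token.toList with
  | nil => rfl
  | cons c cs =>
    by_cases ha : PySem.Chars.isalpha c = true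
    · rw [List.foldl_cons]
      have h1 : pvStep 0 c = 1 := by simp [pvStep, pvTable, ha]
      rw [h1, pvFold_one]
      simp [ha]
    · rw [List.foldl_cons]
      have h2 : pvStep 0 c = 2 := by
        simp only [pvStep, pvTable]
        split_ifs with g1 <;> first | (exact absurd g1 ha) | rfl
      rw [h2, pvFold_two]
      simp [ha]
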